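-- pv_equiv track=rewrite | github.com/Lingfeng555/iViT | experiment_result_processing.py | emnist_number_to_text
-- ===== SOURCE A (Python) =====
-- def emnist_number_to_text(idx):
--     if idx < 0 or idx > 46:
--         raise ValueError(f"Índice {idx} fuera de rango (debe estar entre 0 y 46).")
--
--     mapping_list = (
--         [str(d) for d in range(10)] +                   # '0'–'9'  0–9
--         [chr(c) for c in range(65, 91)] +               # 'A'–'Z'  10–35
--         ['a','b','d','e','f','g','h','n','q','r','t']   # 'a'-'t'  36–46
--     )
--     return mapping_list[idx]
-- ===== SOURCE B (Python) =====
-- def emnist_number_to_text(idx):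
--     if idx < 0 or idx > 46:
--         raise ValueError(f"Índice {idx} fuera de rango (debe estar entre 0 y 46).")
--     if idx < 10:
--         return chr(48 + idx)
--     if idx < 36:
--         return chr(55 + idx)
--     return 'abdefghnqrt'[idx - 36]
-- ===== Notes on version B (the rewrite author's own statement) =====
-- stated objective: idiomatic
-- what changed: Replaces building and indexing a 47-element concatenated table with closed-form code-point arithmetic for digits and uppercase letters plus an 11-char literal for the lowercase tail.
import Mathlib
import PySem

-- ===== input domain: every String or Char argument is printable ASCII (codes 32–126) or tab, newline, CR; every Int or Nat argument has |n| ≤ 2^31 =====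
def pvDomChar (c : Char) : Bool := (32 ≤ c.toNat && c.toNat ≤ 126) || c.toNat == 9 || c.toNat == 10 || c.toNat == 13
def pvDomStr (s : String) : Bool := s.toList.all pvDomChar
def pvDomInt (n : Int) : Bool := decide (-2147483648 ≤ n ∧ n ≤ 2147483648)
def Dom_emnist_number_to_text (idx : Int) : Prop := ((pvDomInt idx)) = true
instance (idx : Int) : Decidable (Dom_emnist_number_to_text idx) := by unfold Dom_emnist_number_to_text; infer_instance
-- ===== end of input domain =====

-- B replaces A's concatenated 47-entry lookup table by code-point arithmetic (O(1), idiomatic).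
-- A raises ValueError outside 0..46; Pre_ excludes exactly those inputs.
-- ===== PORT A =====
def emnist_number_to_text (idx : Int) : String :=
  let mapping_list : List String :=
    ((PySem.List.pyRange 0 10 1).map (fun d => PySem.Int.toStr d)) ++
    ((PySem.List.pyRange 65 91 1).map (fun c => String.singleton (Char.ofNat c.toNat))) ++
    ["a","b","d","e","f","g","h","n","q","r","t"]
  (PySem.List.pyGet? mapping_list idx).getD ""

-- ===== PORT B =====
def emnist_number_to_text_alt (idx : Int) : String :=
  if idx < 10 then String.singleton (Char.ofNat (48 + idx).toNat)
  else if idx < 36 then String.singleton (Char.ofNat (55 + idx).toNat)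
  else String.singleton ((PySem.Str.pyGet? "abdefghnqrt" (idx - 36)).getD ' ')

-- ===== PRECONDITION & SPEC =====
-- A raises ValueError (out-of-range message) for idx < 0 or idx > 46; Pre_ admits exactly 0..46.
def Pre_emnist_number_to_text (idx : Int) : Prop := 0 ≤ idx ∧ idx ≤ 46
instance (idx : Int) : Decidable (Pre_emnist_number_to_text idx) := by unfold Pre_emnist_number_to_text; infer_instance
def pvWitness_emnist_number_to_text : Int := (7)
def Spec_emnist_number_to_text (idx : Int) (out : String) : Prop := out = emnist_number_to_text_alt idx
instance (idx : Int) (out : String) : Decidable (Spec_emnist_number_to_text idx out) := by unfold Spec_emnist_number_to_text; infer_instance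

-- ===== CLAIM =====
def Claim_equal_emnist_number_to_text : Prop := ∀ (idx : Int), Dom_emnist_number_to_text idx → Pre_emnist_number_to_text idx → Spec_emnist_number_to_text idx (emnist_number_to_text idx)

-- ===== LEMMAS AND PROOFS =====

-- ===== VERDICT =====
theorem emnist_number_to_text_spec : Claim_equal_emnist_number_to_text := by
  intro idx _ hpre
  obtain ⟨h0, h46⟩ := hpre
  unfold Spec_emnist_number_to_text
  interval_cases idx <;> rfl
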